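-- pv_equiv track=rewrite | github.com/chrislit/abydos | abydos/distance/_cormode_lz.py | dist_abs
-- ===== SOURCE A (Python) =====
-- def dist_abs(src, tar):
--     """Return the Cormode's LZ distance of two strings.
--
--     Parameters
--     ----------
--     src : str
--         Source string for comparison
--     tar : str
--         Target string for comparison
--
--     Returns
--     -------
--     float
--         Cormode's LZ distance
--
--     Examples
--     --------
--     >>> cmp = CormodeLZ()
--     >>> cmp.dist_abs('cat', 'hat')
--     0.0
--     >>> cmp.dist_abs('Niall', 'Neil')
--     0.0
--     >>> cmp.dist_abs('aluminum', 'Catalan')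
--     0.0
--     >>> cmp.dist_abs('ATCG', 'TAGC')
--     0.0
--
--
--     .. versionadded:: 0.4.0
--
--     """
--     edits = 0
--     pos = 0
--     span = 1
--
--     while max(pos + 1, pos + span) <= len(src):
--         if (src[pos : pos + span] in tar) or (
--             src[pos : pos + span] in src[:pos]
--         ):
--             span += 1
--         else:
--             edits += 1
--             pos += max(1, span - 1)
--             span = 1
--
--     return 1 + edits
-- ===== SOURCE B (Python) =====
-- def dist_abs(src, tar):
--     """Cormode LZ edit count: per phrase, find the longest extension by
--     exponential (galloping) + binary search over the match length, using that
--     the substring-of-tar-or-of-prior-src test is monotone in the length."""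
--     n = len(src)
--     edits = 0
--     pos = 0
--     while pos < n:
--         rem = n - pos
--         if src[pos : pos + 1] in tar or src[pos : pos + 1] in src[:pos]:
--             g = 1
--             while 2 * g <= rem and (
--                 src[pos : pos + 2 * g] in tar or src[pos : pos + 2 * g] in src[:pos]
--             ):
--                 g *= 2
--             lo = g
--             hi = min(2 * g, rem)
--             while lo < hi:
--                 mid = (lo + hi + 1) // 2
--                 if src[pos : pos + mid] in tar or src[pos : pos + mid] in src[:pos]:
--                     lo = mid
--                 else:
--                     hi = mid - 1
--             best = lo
--         else:
--             best = 0
--         if best == rem: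
--             break
--         edits += 1
--         pos += max(1, best)
--     return 1 + edits
-- ===== Notes on version B (the rewrite author's own statement) =====
-- stated objective: alternative
-- what changed: Per LZ phrase, B finds the longest extension by exponential (galloping) plus binary search over the match length, exploiting that the substring-containment test is monotone in the length, instead of A's growing the span one character at a time; this cuts the containment tests per phrase from O(L) to O(log L), but each probe is larger and fails more often, so on short-match inputs B's wall-clock time is similar to or somewhat above A's.
import Mathlib
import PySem

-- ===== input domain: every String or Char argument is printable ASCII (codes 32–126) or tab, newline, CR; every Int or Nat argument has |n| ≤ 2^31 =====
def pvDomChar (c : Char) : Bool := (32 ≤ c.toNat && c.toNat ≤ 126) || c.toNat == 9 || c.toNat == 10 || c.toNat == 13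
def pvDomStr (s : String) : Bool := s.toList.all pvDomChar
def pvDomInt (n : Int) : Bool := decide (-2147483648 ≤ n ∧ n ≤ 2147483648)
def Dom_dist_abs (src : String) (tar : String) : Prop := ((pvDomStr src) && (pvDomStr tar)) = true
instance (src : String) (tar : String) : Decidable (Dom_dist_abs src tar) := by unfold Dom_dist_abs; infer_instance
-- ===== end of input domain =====

-- B replaces A's one-character-at-a-time phrase growth with a per-phrase galloping +
-- binary search over the match length (the substring test is monotone in the length);
-- same value everywhere. Fuel parameters only make the loops total; the wrappers pass
-- provably sufficient fuel.

-- shared helper: the Python test `src[pos:pos+l] in tar or src[pos:pos+l] in src[:pos]`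
-- (both A and B contain this exact expression)
def pvCheck (s t : List Char) (pos l : Nat) : Bool :=
  PySem.Chars.isIn (PySem.List.slice s (some (pos : Int)) (some ((pos : Int) + (l : Int)))) t ||
  PySem.Chars.isIn (PySem.List.slice s (some (pos : Int)) (some ((pos : Int) + (l : Int))))
    (PySem.List.slice s none (some (pos : Int)))

-- ===== PORT A =====
-- A's single while loop over state (edits, pos, span)
def pvLoopA (s t : List Char) : Nat → Nat → Nat → Nat → Nat
  | 0, edits, _, _ => edits
  | fuel + 1, edits, pos, span =>
    if max (pos + 1) (pos + span) ≤ s.length then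
      if pvCheck s t pos span then
        pvLoopA s t fuel edits pos (span + 1)
      else
        pvLoopA s t fuel (edits + 1) (pos + max 1 (span - 1)) 1
    else edits

def dist_abs (src : String) (tar : String) : Int :=
  1 + (pvLoopA src.toList tar.toList (2 * src.toList.length + 2) 0 0 1 : Int)

-- ===== PORT B =====
-- galloping phase: double g while the doubled length still matches (Python's first inner while)
def pvGallop (s t : List Char) (pos rem : Nat) : Nat → Nat → Nat
  | 0, g => g
  | fuel + 1, g =>
    if 2 * g ≤ rem ∧ pvCheck s t pos (2 * g) = true then
      pvGallop s t pos rem fuel (2 * g)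
    else g

-- binary search for the largest l in [lo, hi] passing pvCheck (Python's second inner while)
def pvBsearch (s t : List Char) (pos : Nat) : Nat → Nat → Nat → Nat
  | 0, lo, _ => lo
  | fuel + 1, lo, hi =>
    if lo < hi then
      if pvCheck s t pos ((lo + hi + 1) / 2) then
        pvBsearch s t pos fuel ((lo + hi + 1) / 2) hi
      else
        pvBsearch s t pos fuel lo ((lo + hi + 1) / 2 - 1)
    else lo

-- B's per-phrase block: longest matching extension length at pos
def pvBestL (s t : List Char) (pos rem : Nat) : Nat :=
  if pvCheck s t pos 1 then
    let g := pvGallop s t pos rem rem 1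
    pvBsearch s t pos rem g (min (2 * g) rem)
  else 0

-- B's outer while loop over state (edits, pos): one step per phrase
def pvLoopB (s t : List Char) : Nat → Nat → Nat → Nat
  | 0, edits, _ => edits
  | fuel + 1, edits, pos =>
    if pos < s.length then
      let rem := s.length - pos
      let L := pvBestL s t pos rem
      if L = rem then edits
      else pvLoopB s t fuel (edits + 1) (pos + max 1 L)
    else edits

def dist_abs_alt (src : String) (tar : String) : Int :=
  1 + (pvLoopB src.toList tar.toList src.toList.length 0 0 : Int)

-- ===== PRECONDITION & SPEC =====
def Spec_dist_abs (src : String) (tar : String) (out : Int) : Prop := out = dist_abs_alt src tar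
instance (src : String) (tar : String) (out : Int) : Decidable (Spec_dist_abs src tar out) := by unfold Spec_dist_abs; infer_instance

-- ===== CLAIM (what is proved, stated in full; the proofs are below) =====
def Claim_equal_dist_abs : Prop := ∀ (src : String) (tar : String), Dom_dist_abs src tar → Spec_dist_abs src tar (dist_abs src tar)

-- ===== LEMMAS AND PROOFS =====

-- the check in drop/take form
lemma pvCheck_eq (s t : List Char) (pos l : Nat) :
    pvCheck s t pos l =
      (PySem.Chars.isIn ((s.drop pos).take l) t ||
       PySem.Chars.isIn ((s.drop pos).take l) (s.take pos)) := by
  simp [pvCheck, PySem.List.slice_natCast_add, PySem.List.slice_to_natCast]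

lemma pvCheck_zero (s t : List Char) (pos : Nat) : pvCheck s t pos 0 = true := by
  simp [pvCheck_eq, PySem.Chars.isIn_nil]

-- monotonicity: a longer match contains the shorter one as a prefix
lemma pvCheck_mono (s t : List Char) (pos : Nat) {l l' : Nat} (h : l ≤ l')
    (h' : pvCheck s t pos l' = true) : pvCheck s t pos l = true := by
  rw [pvCheck_eq] at h' ⊢
  have hpre : (s.drop pos).take l <+: (s.drop pos).take l' := by
    have := List.take_prefix l ((s.drop pos).take l')
    rwa [List.take_take, Nat.min_eq_left h] at this
  simp only [Bool.or_eq_true, PySem.Chars.isIn_iff_infix] at h' ⊢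
  rcases h' with h' | h'
  · exact Or.inl (hpre.isInfix.trans h')
  · exact Or.inr (hpre.isInfix.trans h')

-- A's loop returns the accumulator as soon as the guard fails, whatever the fuel
lemma pvLoopA_out (s t : List Char) (fuel edits pos span : Nat)
    (h : ¬ max (pos + 1) (pos + span) ≤ s.length) :
    pvLoopA s t fuel edits pos span = edits := by
  cases fuel with
  | zero => rfl
  | succ fuel => rw [pvLoopA, if_neg h]

-- A's loop does not depend on the fuel once the fuel covers the loop measure
lemma pvLoopA_fuel (s t : List Char) :
    ∀ fuel fuel' edits pos span,
      2 * s.length + 2 - (2 * pos + span) ≤ fuel →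
      2 * s.length + 2 - (2 * pos + span) ≤ fuel' →
      pvLoopA s t fuel edits pos span = pvLoopA s t fuel' edits pos span := by
  intro fuel
  induction fuel with
  | zero =>
    intro fuel' edits pos span hμ hμ'
    have hg : ¬ max (pos + 1) (pos + span) ≤ s.length := by
      intro hg
      rcases max_le_iff.mp hg with ⟨h1, h2⟩
      omega
    rw [pvLoopA_out s t 0 edits pos span hg, pvLoopA_out s t fuel' edits pos span hg]
  | succ fuel ih =>
    intro fuel' edits pos span hμ hμ'
    by_cases hg : max (pos + 1) (pos + span) ≤ s.length
    · rcases max_le_iff.mp hg with ⟨h1, h2⟩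
      cases fuel' with
      | zero => omega
      | succ fuel' =>
        rw [pvLoopA, pvLoopA, if_pos hg, if_pos hg]
        by_cases hc : pvCheck s t pos span = true
        · rw [if_pos hc, if_pos hc]
          exact ih fuel' edits pos (span + 1) (by omega) (by omega)
        · rw [if_neg hc, if_neg hc]
          exact ih fuel' (edits + 1) (pos + max 1 (span - 1)) 1 (by omega) (by omega)
    · rw [pvLoopA_out s t _ edits pos span hg, pvLoopA_out s t fuel' edits pos span hg]

-- galloping correctness: from a feasible g it reaches a feasible g' with nothing
-- feasible beyond min (2*g') rem (given fuel ≥ rem - g)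
lemma pvGallop_spec (s t : List Char) (pos rem : Nat) :
    ∀ fuel g, 1 ≤ g → g ≤ rem → rem - g ≤ fuel → pvCheck s t pos g = true →
      pvCheck s t pos (pvGallop s t pos rem fuel g) = true ∧
      g ≤ pvGallop s t pos rem fuel g ∧ pvGallop s t pos rem fuel g ≤ rem ∧
      (∀ l, min (2 * pvGallop s t pos rem fuel g) rem < l → l ≤ rem →
        pvCheck s t pos l = false) := by
  intro fuel
  induction fuel with
  | zero =>
    intro g hg1 hgrem hfuel hfeas
    have : g = rem := by omega
    exact ⟨hfeas, le_refl _, hgrem, fun l h1 h2 => by simp only [pvGallop] at h1; omega⟩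
  | succ fuel ih =>
    intro g hg1 hgrem hfuel hfeas
    rw [pvGallop]
    by_cases hc : 2 * g ≤ rem ∧ pvCheck s t pos (2 * g) = true
    · rw [if_pos hc]
      obtain ⟨r1, r2, r3, r4⟩ := ih (2 * g) (by omega) hc.1 (by omega) hc.2
      exact ⟨r1, by omega, r3, r4⟩
    · rw [if_neg hc]
      refine ⟨hfeas, le_refl _, hgrem, ?_⟩
      intro l h1 h2
      by_cases h2g : 2 * g ≤ rem
      · have hcf : pvCheck s t pos (2 * g) = false := by
          cases h : pvCheck s t pos (2 * g)
          · rfl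
          · exact absurd ⟨h2g, h⟩ hc
        cases h : pvCheck s t pos l
        · rfl
        · exact absurd (pvCheck_mono s t pos (l := 2 * g) (by omega) h) (by simp [hcf])
      · omega

-- binary-search correctness: with a monotone predicate, from a feasible lo it
-- returns the greatest feasible index ≤ hi (given fuel ≥ hi - lo)
lemma pvBsearch_spec (s t : List Char) (pos : Nat) :
    ∀ fuel lo hi, hi - lo ≤ fuel → lo ≤ hi → pvCheck s t pos lo = true →
      pvCheck s t pos (pvBsearch s t pos fuel lo hi) = true ∧
      lo ≤ pvBsearch s t pos fuel lo hi ∧ pvBsearch s t pos fuel lo hi ≤ hi ∧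
      (∀ l, pvBsearch s t pos fuel lo hi < l → l ≤ hi → pvCheck s t pos l = false) := by
  intro fuel
  induction fuel with
  | zero =>
    intro lo hi hfuel hle hfeas
    exact ⟨hfeas, le_refl _, hle, fun l h1 h2 => by simp only [pvBsearch] at h1; omega⟩
  | succ fuel ih =>
    intro lo hi hfuel hle hfeas
    rw [pvBsearch]
    by_cases hlt : lo < hi
    · rw [if_pos hlt]
      have h1 : lo < (lo + hi + 1) / 2 := by omega
      have h2 : (lo + hi + 1) / 2 ≤ hi := by omega
      by_cases hc : pvCheck s t pos ((lo + hi + 1) / 2) = true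
      · rw [if_pos hc]
        obtain ⟨r1, r2, r3, r4⟩ := ih ((lo + hi + 1) / 2) hi (by omega) h2 hc
        exact ⟨r1, by omega, r3, r4⟩
      · rw [if_neg hc]
        have hc' : pvCheck s t pos ((lo + hi + 1) / 2) = false := by
          cases h : pvCheck s t pos ((lo + hi + 1) / 2)
          · rfl
          · exact absurd h hc
        obtain ⟨r1, r2, r3, r4⟩ := ih lo ((lo + hi + 1) / 2 - 1) (by omega) (by omega) hfeas
        refine ⟨r1, r2, by omega, ?_⟩
        intro l hl1 hl2
        by_cases hml : l ≤ (lo + hi + 1) / 2 - 1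
        · exact r4 l hl1 hml
        · cases h : pvCheck s t pos l
          · rfl
          · exact absurd (pvCheck_mono s t pos (l := (lo + hi + 1) / 2) (by omega) h) hc
    · rw [if_neg hlt]
      exact ⟨hfeas, le_refl _, hle, fun l h1 h2 => by omega⟩

-- B's phrase block computes the greatest feasible extension length ≤ rem
lemma pvBestL_spec (s t : List Char) (pos rem : Nat) (hrem : 1 ≤ rem) :
    pvCheck s t pos (pvBestL s t pos rem) = true ∧
    pvBestL s t pos rem ≤ rem ∧
    (∀ l, pvBestL s t pos rem < l → l ≤ rem → pvCheck s t pos l = false) := by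
  simp only [pvBestL]
  by_cases h1 : pvCheck s t pos 1 = true
  · rw [if_pos h1]
    obtain ⟨g1, g2, g3, g4⟩ :=
      pvGallop_spec s t pos rem rem 1 (le_refl _) hrem (by omega) h1
    obtain ⟨b1, b2, b3, b4⟩ :=
      pvBsearch_spec s t pos rem (pvGallop s t pos rem rem 1)
        (min (2 * pvGallop s t pos rem rem 1) rem) (by omega) (by omega) g1
    refine ⟨b1, by omega, ?_⟩
    intro l hl1 hl2
    by_cases hml : l ≤ min (2 * pvGallop s t pos rem rem 1) rem
    · exact b4 l hl1 hml
    · exact g4 l (by omega) hl2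
  · rw [if_neg h1]
    refine ⟨pvCheck_zero s t pos, by omega, ?_⟩
    intro l hl1 hl2
    cases h : pvCheck s t pos l
    · rfl
    · exact absurd (pvCheck_mono s t pos (l := 1) (by omega) h) h1

-- per-phrase lemma: A's extension steps from span k collapse to one phrase step,
-- for any L that is the greatest feasible extension length
lemma pvPhrase (s t : List Char) (pos : Nat) (hpos : pos + 1 ≤ s.length) (L : Nat)
    (hLfeas : pvCheck s t pos L = true) (hLle : L ≤ s.length - pos)
    (hLmax : ∀ l, L < l → l ≤ s.length - pos → pvCheck s t pos l = false) :
    ∀ fuel edits k, 2 * s.length + 2 - (2 * pos + k) ≤ fuel → 1 ≤ k →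
      pvCheck s t pos (k - 1) = true → k ≤ L + 1 →
      pvLoopA s t fuel edits pos k =
        (if L = s.length - pos then edits
         else pvLoopA s t (2 * s.length + 2) (edits + 1) (pos + max 1 L) 1) := by
  set rem := s.length - pos with hrem
  intro fuel
  induction fuel with
  | zero =>
    intro edits k hfuel hk1 hkfeas hkL
    -- fuel 0 forces the measure to be 0, so the guard fails and L = rem
    have hg : ¬ max (pos + 1) (pos + k) ≤ s.length := by
      intro hg
      rcases max_le_iff.mp hg with ⟨h1, h2⟩
      omega
    have h2 : ¬ (pos + k ≤ s.length) := fun h => hg (max_le_iff.mpr ⟨hpos, h⟩)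
    have hLrem : L = rem := by omega
    rw [pvLoopA_out s t 0 edits pos k hg, if_pos hLrem]
  | succ fuel ih =>
    intro edits k hfuel hk1 hkfeas hkL
    rw [pvLoopA]
    by_cases hg : max (pos + 1) (pos + k) ≤ s.length
    · rw [if_pos hg]
      have hkrem : k ≤ rem := by
        rcases max_le_iff.mp hg with ⟨-, h2⟩; omega
      by_cases hc : pvCheck s t pos k = true
      · have hkLle : k ≤ L := by
          by_contra hgt
          exact absurd hc (by simp [hLmax k (by omega) hkrem])
        rw [if_pos hc]
        exact ih edits (k + 1) (by omega) (by omega) (by simpa using hc) (by omega)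
      · have hc' : pvCheck s t pos k = false := by
          cases h : pvCheck s t pos k
          · rfl
          · exact absurd h hc
        have hLk : L = k - 1 := by
          have hge : k - 1 ≤ L := by
            by_contra hlt
            exact absurd hkfeas (by simp [hLmax (k - 1) (by omega) (by omega)])
          have hle' : L ≤ k - 1 := by
            by_contra hgt
            exact absurd (pvCheck_mono s t pos (l := k) (l' := L) (by omega) hLfeas)
              (by simp [hc'])
          omega
        rw [if_neg hc]
        have hLne : L ≠ rem := by omega
        rw [if_neg hLne, hLk]
        exact pvLoopA_fuel s t fuel (2 * s.length + 2) (edits + 1)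
          (pos + max 1 (k - 1)) 1 (by omega) (by omega)
    · rw [if_neg hg]
      have h2 : ¬ (pos + k ≤ s.length) := fun h => hg (max_le_iff.mpr ⟨hpos, h⟩)
      have hLrem : L = rem := by omega
      rw [if_pos hLrem]

-- main loop correspondence (fuel for B bounds s.length - pos)
lemma pvLoop_eq (s t : List Char) :
    ∀ fuel pos edits, s.length - pos ≤ fuel → pos ≤ s.length →
      pvLoopA s t (2 * s.length + 2) edits pos 1 = pvLoopB s t fuel edits pos := by
  intro fuel
  induction fuel with
  | zero =>
    intro pos edits hfuel hpos
    rw [pvLoopA_out s t _ edits pos 1 (by simp; omega)]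
    rfl
  | succ fuel ih =>
    intro pos edits hfuel hpos
    rw [pvLoopB]
    by_cases hlt : pos < s.length
    · simp only [hlt, if_true]
      obtain ⟨hLfeas, hLle, hLmax⟩ := pvBestL_spec s t pos (s.length - pos) (by omega)
      have hmain := pvPhrase s t pos (by omega) (pvBestL s t pos (s.length - pos))
        hLfeas hLle hLmax (2 * s.length + 2) edits 1 (by omega) (le_refl _)
        (pvCheck_zero s t pos) (by omega)
      rw [hmain]
      by_cases hfull : pvBestL s t pos (s.length - pos) = s.length - pos
      · rw [if_pos hfull, if_pos hfull]
      · rw [if_neg hfull, if_neg hfull]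
        exact ih (pos + max 1 (pvBestL s t pos (s.length - pos))) (edits + 1)
          (by omega) (by omega)
    · rw [if_neg hlt, pvLoopA_out s t _ edits pos 1 (by simp; omega)]

-- ===== VERDICT (by name: the statement is the Claim_ definition above) =====
theorem dist_abs_spec : Claim_equal_dist_abs := by
  intro src tar _
  unfold Spec_dist_abs dist_abs dist_abs_alt
  rw [pvLoop_eq src.toList tar.toList src.toList.length 0 0 (by omega) (by omega)]
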